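-- pv_equiv track=rewrite | github.com/Aman16-07/Kyros--Backend | backend/app/utils/id_generators.py | validate_season_id_format
-- ===== SOURCE A (Python) =====
-- import string
--
-- def validate_season_id_format(season_id: str) -> bool:
--     """Validate that a season ID matches the expected format."""
--     if not season_id or len(season_id) != 9:
--         return False
--
--     if season_id[4] != '-':
--         return False
--
--     valid_chars = set(string.ascii_uppercase + string.digits)
--     part1, part2 = season_id[:4], season_id[5:]
--
--     return all(c in valid_chars for c in part1 + part2)
-- ===== SOURCE B (Python) =====
-- import re
--
-- _SEASON_ID_RE = re.compile(r'[A-Z0-9]{4}-[A-Z0-9]{4}')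
--
-- def validate_season_id_format(season_id: str) -> bool:
--     """Validate that a season ID matches the expected format."""
--     if not season_id:
--         return False
--     return bool(_SEASON_ID_RE.fullmatch(season_id))
-- ===== Notes on version B (the rewrite author's own statement) =====
-- stated objective: idiomatic
-- what changed: Replaces the separate length check, positional dash test and set-membership scan with a single precompiled regex fullmatch of [A-Z0-9]{4}-[A-Z0-9]{4} (guarding only the falsy input).
import Mathlib
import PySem

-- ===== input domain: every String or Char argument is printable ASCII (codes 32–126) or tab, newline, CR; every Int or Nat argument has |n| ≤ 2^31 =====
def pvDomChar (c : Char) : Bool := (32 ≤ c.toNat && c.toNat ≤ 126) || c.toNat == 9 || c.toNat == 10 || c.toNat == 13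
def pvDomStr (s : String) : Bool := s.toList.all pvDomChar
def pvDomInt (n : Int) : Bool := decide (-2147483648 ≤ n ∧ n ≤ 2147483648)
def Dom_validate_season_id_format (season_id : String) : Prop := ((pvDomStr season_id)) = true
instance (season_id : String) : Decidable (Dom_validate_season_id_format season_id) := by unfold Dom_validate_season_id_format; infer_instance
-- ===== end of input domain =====

-- B replaces A's separate length / dash-position / set-membership steps by a single
-- fullmatch of the fixed pattern [A-Z0-9]{4}-[A-Z0-9]{4} (idiomatic regex validation).


-- ===== PORT A =====
-- valid_chars = set(string.ascii_uppercase + string.digits)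
def pvValidChars : PySem.Set Char :=
  PySem.Set.ofList "ABCDEFGHIJKLMNOPQRSTUVWXYZ0123456789".toList

def validate_season_id_format (season_id : String) : Bool :=
  if season_id.toList.isEmpty || !(PySem.Str.len season_id == 9) then false
  else if !(PySem.Str.pyGet? season_id 4 == some '-') then false
  else
    let part1 := PySem.Str.slice season_id none (some 4)
    let part2 := PySem.Str.slice season_id (some 5) none
    (part1.toList ++ part2.toList).all (fun c => pvValidChars.contains c)

-- ===== PORT B =====
-- the character class [A-Z0-9]
def pvCls (c : Char) : Bool := ('A' ≤ c && c ≤ 'Z') || ('0' ≤ c && c ≤ '9')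

-- hand port of re.fullmatch(r'[A-Z0-9]{4}-[A-Z0-9]{4}', season_id): for this fixed
-- pattern a fullmatch is exactly a 9-character shape test, checked position by position.
def validate_season_id_format_alt (season_id : String) : Bool :=
  if season_id.toList.isEmpty then false
  else
    match season_id.toList with
    | [a, b, c, d, e, f, g, h, i] =>
        pvCls a && pvCls b && pvCls c && pvCls d && (e == '-') &&
        pvCls f && pvCls g && pvCls h && pvCls i
    | _ => false

-- ===== PRECONDITION & SPEC =====
def Spec_validate_season_id_format (season_id : String) (out : Bool) : Prop := out = validate_season_id_format_alt season_id
instance (season_id : String) (out : Bool) : Decidable (Spec_validate_season_id_format season_id out) := by unfold Spec_validate_season_id_format; infer_instance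

-- ===== CLAIM (what is proved, stated in full; the proofs are below) =====
def Claim_equal_validate_season_id_format : Prop := ∀ (season_id : String), Dom_validate_season_id_format season_id → Spec_validate_season_id_format season_id (validate_season_id_format season_id)

-- ===== LEMMAS AND PROOFS =====
theorem pv_char_eq_iff_toNat (c d : Char) : c = d ↔ c.toNat = d.toNat := by
  constructor
  · intro h; rw [h]
  · intro h; exact Char.ext (UInt32.toNat_inj.mp h)

theorem pv_mem_iff_range (c : Char) :
    c ∈ pvValidChars ↔ (65 ≤ c.toNat ∧ c.toNat ≤ 90) ∨ (48 ≤ c.toNat ∧ c.toNat ≤ 57) := by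
  rw [pvValidChars, PySem.Set.mem_ofList]
  rw [show ("ABCDEFGHIJKLMNOPQRSTUVWXYZ0123456789".toList) = ['A','B','C','D','E','F','G','H','I','J','K','L','M','N','O','P','Q','R','S','T','U','V','W','X','Y','Z','0','1','2','3','4','5','6','7','8','9'] from rfl]
  simp only [List.mem_cons, List.not_mem_nil, or_false, pv_char_eq_iff_toNat,
    show (Char.toNat 'A') = 65 from rfl, show (Char.toNat 'B') = 66 from rfl, show (Char.toNat 'C') = 67 from rfl, show (Char.toNat 'D') = 68 from rfl, show (Char.toNat 'E') = 69 from rfl, show (Char.toNat 'F') = 70 from rfl, show (Char.toNat 'G') = 71 from rfl, show (Char.toNat 'H') = 72 from rfl, show (Char.toNat 'I') = 73 from rfl, show (Char.toNat 'J') = 74 from rfl, show (Char.toNat 'K') = 75 from rfl, show (Char.toNat 'L') = 76 from rfl, show (Char.toNat 'M') = 77 from rfl, show (Char.toNat 'N') = 78 from rfl, show (Char.toNat 'O') = 79 from rfl, show (Char.toNat 'P') = 80 from rfl, show (Char.toNat 'Q') = 81 from rfl, show (Char.toNat 'R') = 82 from rfl, show (Char.toNat 'S') = 83 from rfl, show (Char.toNat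 'T') = 84 from rfl, show (Char.toNat 'U') = 85 from rfl, show (Char.toNat 'V') = 86 from rfl, show (Char.toNat 'W') = 87 from rfl, show (Char.toNat 'X') = 88 from rfl, show (Char.toNat 'Y') = 89 from rfl, show (Char.toNat 'Z') = 90 from rfl, show (Char.toNat '0') = 48 from rfl, show (Char.toNat '1') = 49 from rfl, show (Char.toNat '2') = 50 from rfl, show (Char.toNat '3') = 51 from rfl, show (Char.toNat '4') = 52 from rfl, show (Char.toNat '5') = 53 from rfl, show (Char.toNat '6') = 54 from rfl, show (Char.toNat '7') = 55 from rfl, show (Char.toNat '8') = 56 from rfl, show (Char.toNat '9') = 57 from rfl]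
  omega

theorem pv_contains_eq_cls (c : Char) : pvValidChars.contains c = pvCls c := by
  have h := pv_mem_iff_range c
  have hle : ∀ a b : Char, (a ≤ b) = decide (a.toNat ≤ b.toNat) := by
    intro a b; simp [Char.le_def, UInt32.le_iff_toNat_le]
  by_cases hm : c ∈ pvValidChars
  · have h1 : pvValidChars.contains c = true := by simpa using hm
    rw [h1, pvCls]
    rcases h.mp hm with ⟨h2, h3⟩ | ⟨h2, h3⟩ <;>
      simp [hle, show ('A').toNat = 65 from rfl, show ('Z').toNat = 90 from rfl,
        show ('0').toNat = 48 from rfl, show ('9').toNat = 57 from rfl] <;> omega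
  · have h1 : pvValidChars.contains c = false := by simpa using hm
    rw [h1, pvCls]
    have h2 := (h.not).mp hm
    simp [hle, show ('A').toNat = 65 from rfl, show ('Z').toNat = 90 from rfl,
      show ('0').toNat = 48 from rfl, show ('9').toNat = 57 from rfl]
    omega

theorem pv_decide_mem (c : Char) : decide (c ∈ pvValidChars) = pvCls c := by
  rw [← pv_contains_eq_cls]; simp

theorem pv_ab_eq (s : String) :
    validate_season_id_format s = validate_season_id_format_alt s := by
  unfold validate_season_id_format validate_season_id_format_alt
  simp only [pysem, PySem.Str.len, PySem.Str.pyGet?, PySem.Str.slice]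
  generalize s.toList = cs
  rcases cs with _ | ⟨a, _ | ⟨b, _ | ⟨c, _ | ⟨d, _ | ⟨e, _ | ⟨f, _ | ⟨g, _ | ⟨h, _ | ⟨i, _ | ⟨j, rest⟩⟩⟩⟩⟩⟩⟩⟩⟩⟩
  all_goals try simp [PySem.List.slice, PySem.List.clampIdx]
  · -- exactly nine characters: both sides are the same nine per-character tests
    simp only [pv_decide_mem]
    by_cases hd : e = '-'
    · subst hd; simp [Bool.and_assoc]
    · simp [hd]
  · -- ten or more characters: the length premise is impossible
    intro hlen
    exact absurd hlen (by omega)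


-- ===== VERDICT (by name: the statement is the Claim_ definition above) =====
theorem validate_season_id_format_spec : Claim_equal_validate_season_id_format := by
  intro s _
  unfold Spec_validate_season_id_format
  exact pv_ab_eq s
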